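-- pv_equiv track=rewrite | github.com/Yurashku/labik | func_main.py | in_one_river
-- ===== SOURCE A (Python) =====
-- def in_one_river(rivers,coord1,coord2):
--     key=False
--     for river in rivers:
--         cur_river=[x[0]*4+x[1] for x in river]
--         if coord1 in cur_river and coord2 in cur_river:
--             key=True
--             break
--     return key
-- ===== SOURCE B (Python) =====
-- def in_one_river(rivers, coord1, coord2):
--     # Build an index: encoded point -> set of river indices containing it,
--     # then test whether the index sets of the two coords intersect.
--     index = {}
--     for i, river in enumerate(rivers):
--         for x, y in river:
--             index.setdefault(x * 4 + y, set()).add(i)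
--     s1 = index.get(coord1, set())
--     s2 = index.get(coord2, set())
--     return not s1.isdisjoint(s2)
-- ===== Notes on version B (the rewrite author's own statement) =====
-- stated objective: alternative
-- what changed: Replaces A's per-river scan (rebuilding the encoded-point list for each river and breaking on the first river containing both coords) with a one-pass inverted index from encoded point to the set of river indices containing it, answering by set intersection of the two coords' index sets.
import Mathlib
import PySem

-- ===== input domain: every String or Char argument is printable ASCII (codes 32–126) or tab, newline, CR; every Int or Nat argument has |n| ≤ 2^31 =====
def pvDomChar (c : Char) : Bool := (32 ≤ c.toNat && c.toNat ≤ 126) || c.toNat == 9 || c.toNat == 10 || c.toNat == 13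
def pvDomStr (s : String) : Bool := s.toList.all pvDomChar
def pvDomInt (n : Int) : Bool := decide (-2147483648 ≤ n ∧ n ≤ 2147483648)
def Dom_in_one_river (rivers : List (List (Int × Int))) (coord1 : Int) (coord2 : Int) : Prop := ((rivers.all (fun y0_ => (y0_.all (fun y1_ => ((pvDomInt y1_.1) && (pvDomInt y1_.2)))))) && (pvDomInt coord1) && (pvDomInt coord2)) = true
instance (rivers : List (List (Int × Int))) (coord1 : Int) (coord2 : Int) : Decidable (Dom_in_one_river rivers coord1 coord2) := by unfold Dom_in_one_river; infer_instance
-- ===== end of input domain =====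

-- B replaces A's per-river two-membership scan with an inverted index (encoded point ->
-- set of river indices) queried by set intersection; objective: alternative decomposition.

-- ===== PORT A =====
-- for river in rivers: build cur_river, test both membership, break on success
def riverLoopA (coord1 coord2 : Int) : List (List (Int × Int)) → Bool
  | [] => false
  | river :: rest =>
    let cur_river := river.map (fun x => x.1 * 4 + x.2)
    if cur_river.contains coord1 && cur_river.contains coord2 then true
    else riverLoopA coord1 coord2 rest

def in_one_river (rivers : List (List (Int × Int))) (coord1 : Int) (coord2 : Int) : Bool :=
  riverLoopA coord1 coord2 rivers

-- ===== PORT B =====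
-- inner loop: for (x, y) in river: index.setdefault(x*4+y, set()).add(i)
def addRiver (d : PySem.Dict Int (PySem.Set Int)) (i : Int) (river : List (Int × Int)) :
    PySem.Dict Int (PySem.Set Int) :=
  river.foldl (fun d p => d.modify (p.1 * 4 + p.2) PySem.Set.empty (fun s => PySem.Set.add s i)) d

-- outer loop: for i, river in enumerate(rivers)
def buildIndex (i : Int) : List (List (Int × Int)) → PySem.Dict Int (PySem.Set Int) →
    PySem.Dict Int (PySem.Set Int)
  | [], d => d
  | r :: rest, d => buildIndex (i + 1) rest (addRiver d i r)

def in_one_river_alt (rivers : List (List (Int × Int))) (coord1 : Int) (coord2 : Int) : Bool :=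
  let index := buildIndex 0 rivers PySem.Dict.empty
  let s1 := index.getD coord1 PySem.Set.empty
  let s2 := index.getD coord2 PySem.Set.empty
  !(PySem.Set.isdisjoint s1 s2)

-- ===== PRECONDITION & SPEC =====
def Spec_in_one_river (rivers : List (List (Int × Int))) (coord1 : Int) (coord2 : Int) (out : Bool) : Prop := out = in_one_river_alt rivers coord1 coord2
instance (rivers : List (List (Int × Int))) (coord1 : Int) (coord2 : Int) (out : Bool) : Decidable (Spec_in_one_river rivers coord1 coord2 out) := by unfold Spec_in_one_river; infer_instance

-- ===== CLAIM (what is proved, stated in full; the proofs are below) =====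
def Claim_equal_in_one_river : Prop := ∀ (rivers : List (List (Int × Int))) (coord1 : Int) (coord2 : Int), Dom_in_one_river rivers coord1 coord2 → Spec_in_one_river rivers coord1 coord2 (in_one_river rivers coord1 coord2)

-- ===== LEMMAS AND PROOFS =====

theorem mem_addRiver (river : List (Int × Int)) (d : PySem.Dict Int (PySem.Set Int))
    (i : Int) (k j : Int) :
    j ∈ (addRiver d i river).getD k PySem.Set.empty ↔
      j ∈ d.getD k PySem.Set.empty ∨
        (j = i ∧ k ∈ river.map (fun x => x.1 * 4 + x.2)) := by
  induction river generalizing d with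
  | nil => simp [addRiver]
  | cons p rest ih =>
    show j ∈ (addRiver (d.modify (p.1 * 4 + p.2) PySem.Set.empty
        (fun s => PySem.Set.add s i)) i rest).getD k PySem.Set.empty ↔ _
    rw [ih, PySem.Dict.getD_modify]
    by_cases hk : k = p.1 * 4 + p.2
    · subst hk
      rw [if_pos rfl]
      simp only [PySem.Set.mem_add, List.map_cons, List.mem_cons]
      tauto
    · rw [if_neg hk]
      simp only [List.map_cons, List.mem_cons]
      tauto

theorem mem_buildIndex (rivers : List (List (Int × Int))) (n : Int)
    (d : PySem.Dict Int (PySem.Set Int)) (k j : Int) :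
    j ∈ (buildIndex n rivers d).getD k PySem.Set.empty ↔
      j ∈ d.getD k PySem.Set.empty ∨
        ∃ (m : Nat) (h : m < rivers.length),
          j = n + m ∧ k ∈ (rivers[m]).map (fun x => x.1 * 4 + x.2) := by
  induction rivers generalizing n d with
  | nil => simp [buildIndex]
  | cons r rest ih =>
    show j ∈ (buildIndex (n + 1) rest (addRiver d n r)).getD k PySem.Set.empty ↔ _
    rw [ih, mem_addRiver]
    constructor
    · rintro ((h | ⟨rfl, hk⟩) | ⟨m, hm, rfl, hk⟩)
      · exact Or.inl h
      · exact Or.inr ⟨0, by simp, by simp, hk⟩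
      · exact Or.inr ⟨m + 1, by simp only [List.length_cons]; omega, by push_cast; ring,
          by simpa using hk⟩
    · rintro (h | ⟨m, hm, rfl, hk⟩)
      · exact Or.inl (Or.inl h)
      · cases m with
        | zero => exact Or.inl (Or.inr ⟨by simp, by simpa using hk⟩)
        | succ m =>
          exact Or.inr ⟨m, by simp only [List.length_cons] at hm; omega, by push_cast; ring,
            by simpa using hk⟩

theorem riverLoopA_eq_any (coord1 coord2 : Int) (rivers : List (List (Int × Int))) :
    riverLoopA coord1 coord2 rivers =
      rivers.any (fun river => (river.map (fun x => x.1 * 4 + x.2)).contains coord1 &&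
        (river.map (fun x => x.1 * 4 + x.2)).contains coord2) := by
  induction rivers with
  | nil => rfl
  | cons r rest ih =>
    simp only [riverLoopA, List.any_cons, ← ih]
    cases hb : ((r.map (fun x => x.1 * 4 + x.2)).contains coord1 &&
        (r.map (fun x => x.1 * 4 + x.2)).contains coord2) <;> simp

theorem riverLoopA_iff (coord1 coord2 : Int) (rivers : List (List (Int × Int))) :
    riverLoopA coord1 coord2 rivers = true ↔
      ∃ (m : Nat) (h : m < rivers.length),
        coord1 ∈ (rivers[m]).map (fun x => x.1 * 4 + x.2) ∧
        coord2 ∈ (rivers[m]).map (fun x => x.1 * 4 + x.2) := by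
  rw [riverLoopA_eq_any]
  simp only [List.any_eq_true, Bool.and_eq_true, List.contains_iff_mem]
  constructor
  · rintro ⟨r, hr, h1, h2⟩
    obtain ⟨m, hm, hme⟩ := List.mem_iff_getElem.1 hr
    exact ⟨m, hm, by rw [hme]; exact h1, by rw [hme]; exact h2⟩
  · rintro ⟨m, hm, h1, h2⟩
    exact ⟨rivers[m], List.getElem_mem hm, h1, h2⟩

theorem alt_iff (rivers : List (List (Int × Int))) (coord1 coord2 : Int) :
    in_one_river_alt rivers coord1 coord2 = true ↔
      ∃ (m : Nat) (h : m < rivers.length),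
        coord1 ∈ (rivers[m]).map (fun x => x.1 * 4 + x.2) ∧
        coord2 ∈ (rivers[m]).map (fun x => x.1 * 4 + x.2) := by
  unfold in_one_river_alt
  rw [Bool.not_eq_eq_eq_not, Bool.not_true, ← Bool.not_eq_true,
    PySem.Set.isdisjoint_iff]
  push Not
  constructor
  · rintro ⟨j, hj1, hj2⟩
    rw [mem_buildIndex] at hj1 hj2
    rcases hj1 with h | ⟨m1, hm1, rfl, hk1⟩
    · rw [PySem.Dict.getD_empty] at h; simp [PySem.Set.empty] at h
    rcases hj2 with h | ⟨m2, hm2, he, hk2⟩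
    · rw [PySem.Dict.getD_empty] at h; simp [PySem.Set.empty] at h
    have hmm : m1 = m2 := by omega
    subst hmm
    exact ⟨m1, hm1, hk1, hk2⟩
  · rintro ⟨m, hm, h1, h2⟩
    refine ⟨(0 : Int) + m, ?_, ?_⟩ <;>
      · rw [mem_buildIndex]
        exact Or.inr ⟨m, hm, rfl, by assumption⟩

-- ===== VERDICT (by name: the statement is the Claim_ definition above) =====
theorem in_one_river_spec : Claim_equal_in_one_river := by
  intro rivers coord1 coord2 _
  show in_one_river rivers coord1 coord2 = in_one_river_alt rivers coord1 coord2
  rw [Bool.eq_iff_iff]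
  exact (riverLoopA_iff coord1 coord2 rivers).trans (alt_iff rivers coord1 coord2).symm
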